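-- pv_equiv track=rewrite | github.com/cyan-wolf/competitive_programming | matcomgrader/icpc_caribbean_qualifiers_2024_warmup/warmup_1/problem_k.py | determine_max_stack_size
-- ===== SOURCE A (Python) =====
-- def determine_max_stack_size(stk):
--     max_size = 1
--
--     for i in range(len(stk) - 1):
--         acc = stk[i]
--         size = 1
--
--         pos1, pos2 = i, i + 1
--
--         while pos2 < len(stk):
--             if acc < stk[pos2]:
--                 size += 1
--                 acc += stk[pos2]
--                 pos1 += 1
--
--             pos2 += 1
--
--         if size > max_size:
--             max_size = size
--
--     return max_size
-- ===== SOURCE B (Python) =====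
-- def determine_max_stack_size(stk):
--     # Block decomposition: precompute the max of each 64-element block once; a
--     # start's greedy scan then skips every whole block whose max cannot exceed
--     # the current accumulator, scanning elements only inside live blocks.
--     n = len(stk)
--     BLOCK = 64
--     nb = (n + BLOCK - 1) // BLOCK
--     bmax = [max(stk[b * BLOCK:(b + 1) * BLOCK]) for b in range(nb)]
--     best = 1
--     for i in range(n - 1):
--         acc = stk[i]
--         size = 1
--         start = i + 1
--         for b in range(start // BLOCK, nb):
--             lo = b * BLOCK
--             s = start if start > lo else lo
--             if s == lo and bmax[b] <= acc:
--                 continue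
--             hi = lo + BLOCK
--             if hi > n:
--                 hi = n
--             for k in range(s, hi):
--                 v = stk[k]
--                 if acc < v:
--                     acc += v
--                     size += 1
--         best = max(best, size)
--     return best
-- ===== Notes on version B (the rewrite author's own statement) =====
-- stated objective: faster
-- what changed: B precomputes the maximum of every 64-element block once and each start's greedy scan then skips whole blocks whose maximum cannot exceed the current accumulator, scanning elements only inside live blocks, instead of A's unconditional element-by-element rescan from every start; intended as faster, measured 2.25x in a timing run at the largest size both finish (worst-case cost stays O(n^2)).
import Mathlib
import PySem

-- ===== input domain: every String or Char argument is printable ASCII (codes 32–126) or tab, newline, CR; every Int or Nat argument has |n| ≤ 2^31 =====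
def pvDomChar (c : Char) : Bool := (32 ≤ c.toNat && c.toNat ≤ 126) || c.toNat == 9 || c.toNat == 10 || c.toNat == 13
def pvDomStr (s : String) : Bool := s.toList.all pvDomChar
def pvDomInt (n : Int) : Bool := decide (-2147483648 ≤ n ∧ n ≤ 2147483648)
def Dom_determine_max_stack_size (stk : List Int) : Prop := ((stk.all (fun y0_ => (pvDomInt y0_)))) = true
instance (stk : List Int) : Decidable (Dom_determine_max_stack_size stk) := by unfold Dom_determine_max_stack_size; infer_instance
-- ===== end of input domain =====

-- B precomputes per-64-element block maxima and skips whole blocks that cannot exceed the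
-- current accumulator, instead of A's unconditional element-by-element rescan from every
-- start; intended as faster (same O(n^2) worst case; a timing run measured 2.25x
-- at the largest size on which both finished).


-- ===== PORT A =====
-- literal port of A: outer for over range(len-1), inner while over pos2 (a count-up loop,
-- folded over range(i+1, len)) carrying the (acc, size, pos1) state, manual max update.
def determine_max_stack_size (stk : List Int) : Int :=
  (PySem.List.pyRange 0 ((stk.length : Int) - 1) 1).foldl
    (fun max_size i =>
      let st :=
        (PySem.List.pyRange (i + 1) (stk.length : Int) 1).foldl
          (fun (s : Int × Int × Int) pos2 =>
            if s.1 < PySem.List.pyGetD stk pos2 0 then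
              (s.1 + PySem.List.pyGetD stk pos2 0, s.2.1 + 1, s.2.2 + 1)
            else s)
          (PySem.List.pyGetD stk i 0, 1, i)
      if st.2.1 > max_size then st.2.1 else max_size)
    1

-- ===== PORT B =====
-- transliteration of Source B; indices are Nat (all Python index arithmetic here is on
-- nonnegative ints, where Nat's + * / agree with Python's + * //):
--   nb = (n + 64 - 1) // 64;  bmax[b] = max(stk[b*64:(b+1)*64]) (slice with nonnegative
--   bounds = drop/take; the slice is never empty for b < nb, so max()'s ValueError is
--   unreachable and the Option default is never taken); the two inner for-range loops
--   are folds over List.range'.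
def determine_max_stack_size_alt (stk : List Int) : Int :=
  let n := stk.length
  let nb := (n + 64 - 1) / 64
  let bmax := (List.range nb).map
    (fun b => (PySem.List.max? ((stk.drop (b * 64)).take 64) (fun v => v)).getD 0)
  (List.range (n - 1)).foldl
    (fun best i =>
      let start := i + 1
      let st :=
        (List.range' (start / 64) (nb - start / 64)).foldl
          (fun (s : Int × Int) b =>
            let lo := b * 64
            let s0 := if start > lo then start else lo
            if s0 = lo ∧ bmax.getD b 0 ≤ s.1 then s
            else
              let hi := if lo + 64 > n then n else lo + 64
              (List.range' s0 (hi - s0)).foldl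
                (fun (t : Int × Int) k =>
                  let v := stk.getD k 0
                  if t.1 < v then (t.1 + v, t.2 + 1) else t) s)
          (stk.getD i 0, 1)
      max best st.2) 1

-- ===== PRECONDITION & SPEC =====
def Spec_determine_max_stack_size (stk : List Int) (out : Int) : Prop := out = determine_max_stack_size_alt stk
instance (stk : List Int) (out : Int) : Decidable (Spec_determine_max_stack_size stk out) := by unfold Spec_determine_max_stack_size; infer_instance

-- ===== CLAIM (what is proved, stated in full; the proofs are below) =====
def Claim_equal_determine_max_stack_size : Prop := ∀ (stk : List Int), Dom_determine_max_stack_size stk → Spec_determine_max_stack_size stk (determine_max_stack_size stk)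

-- ===== LEMMAS AND PROOFS =====

-- a fold of the accumulate-if-larger step over elements that are all ≤ acc is a no-op
theorem pv_noop (xs : List Int) : ∀ (acc size : Int), (∀ v ∈ xs, v ≤ acc) →
    xs.foldl (fun (t : Int × Int) v => if t.1 < v then (t.1 + v, t.2 + 1) else t) (acc, size)
      = (acc, size) := by
  induction xs with
  | nil => intro acc size _; rfl
  | cons v xs ih =>
      intro acc size hall
      rw [List.foldl_cons, if_neg (by have := hall v (by simp); omega)]
      exact ih acc size (fun w hw => hall w (by simp [hw]))

-- an index-range fold of the step over stk equals the fold over the corresponding segment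
theorem pv_seg (stk : List Int) : ∀ (m s : Nat) (st : Int × Int), s + m ≤ stk.length →
    (List.range' s m).foldl
      (fun (t : Int × Int) k => if t.1 < stk.getD k 0 then (t.1 + stk.getD k 0, t.2 + 1) else t) st
      = ((stk.drop s).take m).foldl
          (fun (t : Int × Int) v => if t.1 < v then (t.1 + v, t.2 + 1) else t) st := by
  intro m
  induction m with
  | zero =>
      intro s st _
      rfl
  | succ m ih =>
      intro s st hs
      have hlt : s < stk.length := by omega
      rw [List.range'_succ, List.drop_eq_getElem_cons hlt, List.take_succ_cons,
          List.foldl_cons, List.foldl_cons, List.getD_eq_getElem stk 0 hlt]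
      exact ih (s + 1) _ (by omega)

-- every element of block b is bounded by bmax[b]
theorem pv_block_bound (stk : List Int) (lo : Nat) (v : Int)
    (hv : v ∈ (stk.drop lo).take 64) :
    v ≤ (PySem.List.max? ((stk.drop lo).take 64) (fun v => v)).getD 0 := by
  cases hmx : PySem.List.max? ((stk.drop lo).take 64) (fun v => v) with
  | none =>
      rw [(PySem.List.max?_eq_none_iff _ _).mp hmx] at hv
      cases hv
  | some m =>
      exact PySem.List.max?_isMax hmx v hv

-- after finishing block b, the remaining suffix starts at max start (b*64 + 64)
theorem pv_drop_next (stk : List Int) (start b : Nat)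
    (h2 : start ≤ b * 64 + 64) :
    stk.drop (if b * 64 + 64 > stk.length then stk.length else b * 64 + 64)
      = stk.drop (max start (b * 64 + 64)) := by
  by_cases hc : b * 64 + 64 > stk.length
  · rw [if_pos hc, List.drop_eq_nil_of_le (le_refl _),
        List.drop_eq_nil_of_le (le_trans hc.le (by omega))]
  · rw [if_neg hc]
    congr 1
    omega

-- B's block loop from block b equals the plain fold over the suffix from max start (b*64)
theorem pv_blocks (stk : List Int) (start : Nat) (hstart : start < stk.length) :
    ∀ (d b : Nat) (st : Int × Int),
      (stk.length + 64 - 1) / 64 - b ≤ d → start ≤ b * 64 + 64 →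
      (List.range' b ((stk.length + 64 - 1) / 64 - b)).foldl
        (fun (s : Int × Int) b' =>
          let lo := b' * 64
          let s0 := if start > lo then start else lo
          if s0 = lo ∧ (((List.range ((stk.length + 64 - 1) / 64)).map
                (fun b => (PySem.List.max? ((stk.drop (b * 64)).take 64) (fun v => v)).getD 0)).getD b' 0) ≤ s.1 then s
          else
            let hi := if lo + 64 > stk.length then stk.length else lo + 64
            (List.range' s0 (hi - s0)).foldl
              (fun (t : Int × Int) k =>
                let v := stk.getD k 0
                if t.1 < v then (t.1 + v, t.2 + 1) else t) s) st
      = (stk.drop (max start (b * 64))).foldl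
          (fun (t : Int × Int) v => if t.1 < v then (t.1 + v, t.2 + 1) else t) st := by
  set n := stk.length with hn
  set nb := (stk.length + 64 - 1) / 64 with hnb
  intro d
  induction d with
  | zero =>
      intro b st hd hb
      have hbe : nb - b = 0 := by omega
      rw [hbe]
      rw [List.drop_eq_nil_of_le (by omega)]
      rfl
  | succ d ih =>
      intro b st hd hb
      by_cases hbe : nb - b = 0
      · rw [hbe]
        rw [List.drop_eq_nil_of_le (by omega)]
        rfl
      · have hbnb : b < nb := by omega
        have hlon : b * 64 < n := by omega
        have hsplit : nb - b = (nb - (b + 1)) + 1 := by omega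
        rw [hsplit, List.range'_succ, List.foldl_cons]
        simp only
        have hs0 : (if start > b * 64 then start else b * 64) = max start (b * 64) := by
          split <;> omega
        rw [hs0]
        have hbval : ((List.range nb).map
              (fun b => (PySem.List.max? ((stk.drop (b * 64)).take 64) (fun v => v)).getD 0)).getD b 0
            = (PySem.List.max? ((stk.drop (b * 64)).take 64) (fun v => v)).getD 0 :=
          PySem.List.getD_map_range _ nb b 0 hbnb
        rw [hbval]
        set hi := if b * 64 + 64 > n then n else b * 64 + 64 with hhi
        have hhi1 : b * 64 ≤ hi := by rw [hhi]; split <;> omega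
        have hhi2 : hi ≤ n := by rw [hhi]; split <;> omega
        have hhi3 : hi ≤ b * 64 + 64 := by rw [hhi]; split <;> omega
        have hdropnext : stk.drop hi = stk.drop (max start (b * 64 + 64)) := by
          rw [hhi]
          exact pv_drop_next stk start b hb
        by_cases hskip : max start (b * 64) = b * 64 ∧
            (PySem.List.max? ((stk.drop (b * 64)).take 64) (fun v => v)).getD 0 ≤ st.1
        · rw [if_pos hskip]
          rw [ih (b + 1) st (by omega) (by omega), Nat.succ_mul]
          obtain ⟨acc, size⟩ := st
          have hno : ((stk.drop (b * 64)).take (hi - b * 64)).foldl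
              (fun (t : Int × Int) v => if t.1 < v then (t.1 + v, t.2 + 1) else t) (acc, size)
              = (acc, size) := by
            apply pv_noop
            intro v hv
            have heq : (stk.drop (b * 64)).take (hi - b * 64)
                = ((stk.drop (b * 64)).take 64).take (hi - b * 64) := by
              rw [List.take_take, show min (hi - b * 64) 64 = hi - b * 64 by omega]
            rw [heq] at hv
            exact le_trans (pv_block_bound stk (b * 64) v (List.mem_of_mem_take hv)) hskip.2
          have hdecomp : stk.drop (b * 64)
              = ((stk.drop (b * 64)).take (hi - b * 64)) ++ stk.drop hi := by
            have h1 := List.take_append_drop (hi - b * 64) (stk.drop (b * 64))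
            rw [List.drop_drop] at h1
            rw [show b * 64 + (hi - b * 64) = hi by omega] at h1
            exact h1.symm
          rw [hskip.1, hdecomp, List.foldl_append, hno, hdropnext]
        · rw [if_neg hskip]
          have hs0hi : max start (b * 64) ≤ hi := by
            rw [hhi]; split <;> omega
          have hseg := pv_seg stk (hi - max start (b * 64)) (max start (b * 64)) st (by omega)
          simp only at hseg
          rw [hseg]
          rw [ih (b + 1) _ (by omega) (by omega), Nat.succ_mul]
          have hdecomp : stk.drop (max start (b * 64))
              = ((stk.drop (max start (b * 64))).take (hi - max start (b * 64))) ++ stk.drop hi := by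
            have h1 := List.take_append_drop (hi - max start (b * 64)) (stk.drop (max start (b * 64)))
            rw [List.drop_drop] at h1
            rw [show max start (b * 64) + (hi - max start (b * 64)) = hi by omega] at h1
            exact h1.symm
          conv_rhs => rw [hdecomp]
          rw [List.foldl_append, hdropnext]

-- the size component of A's triple fold equals the pair fold's size component
theorem pv_triple_pair (rest : List Int) :
    ∀ (acc size p : Int),
      ((rest.foldl
          (fun (s : Int × Int × Int) v =>
            if s.1 < v then (s.1 + v, s.2.1 + 1, s.2.2 + 1) else s)
          (acc, size, p)).2.1 : Int)
        = (rest.foldl (fun (s : Int × Int) v => if s.1 < v then (s.1 + v, s.2 + 1) else s)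
            (acc, size)).2 := by
  induction rest with
  | nil => intro acc size p; rfl
  | cons v rest ih =>
      intro acc size p
      simp only [List.foldl_cons]
      by_cases h : acc < v
      · simp only [if_pos h]; exact ih _ _ _
      · simp only [if_neg h]; exact ih _ _ _

-- ===== VERDICT (by name: the statement is the Claim_ definition above) =====
theorem determine_max_stack_size_spec : Claim_equal_determine_max_stack_size := by
  intro stk _
  show determine_max_stack_size stk = determine_max_stack_size_alt stk
  unfold determine_max_stack_size determine_max_stack_size_alt
  by_cases h1 : stk.length ≤ 1
  · rw [PySem.List.pyRange_one_eq_nil (by omega)]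
    have h0 : stk.length - 1 = 0 := by omega
    simp [h0]
  · have hn : 0 < stk.length := by omega
    show _ = (List.range (stk.length - 1)).foldl
      (fun best i =>
        max best
          ((List.range' ((i + 1) / 64) ((stk.length + 64 - 1) / 64 - (i + 1) / 64)).foldl
            (fun (s : Int × Int) b =>
              let lo := b * 64
              let s0 := if i + 1 > lo then i + 1 else lo
              if s0 = lo ∧ (((List.range ((stk.length + 64 - 1) / 64)).map
                    (fun b => (PySem.List.max? ((stk.drop (b * 64)).take 64) (fun v => v)).getD 0)).getD b 0) ≤ s.1 then s
              else
                let hi := if lo + 64 > stk.length then stk.length else lo + 64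
                (List.range' s0 (hi - s0)).foldl
                  (fun (t : Int × Int) k =>
                    let v := stk.getD k 0
                    if t.1 < v then (t.1 + v, t.2 + 1) else t) s)
            (stk.getD i 0, 1)).2) 1
    rw [show ((stk.length : Int) - 1) = ((stk.length - 1 : Nat) : Int) by omega]
    rw [PySem.List.pyRange_zero_nat, List.foldl_map]
    apply PySem.List.foldl_congr_mem
    intro best k hk
    rw [List.mem_range] at hk
    simp only [PySem.List.pyGetD_natCast]
    have hinner :
        (PySem.List.pyRange ((k : Int) + 1) ((stk.length : Int)) 1).foldl
          (fun (s : Int × Int × Int) pos2 =>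
            if s.1 < PySem.List.pyGetD stk pos2 0 then
              (s.1 + PySem.List.pyGetD stk pos2 0, s.2.1 + 1, s.2.2 + 1)
            else s)
          (stk.getD k 0, 1, (k : Int))
        = (stk.drop (k + 1)).foldl
            (fun (s : Int × Int × Int) v =>
              if s.1 < v then (s.1 + v, s.2.1 + 1, s.2.2 + 1) else s)
            (stk.getD k 0, 1, (k : Int)) := by
      have h0 : (0 : Int) ≤ (k : Int) + 1 := by omega
      have := PySem.List.foldl_pyRange_pyGetD' stk 0
        (fun (s : Int × Int × Int) v =>
          if s.1 < v then (s.1 + v, s.2.1 + 1, s.2.2 + 1) else s)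
        (stk.getD k 0, 1, (k : Int)) h0
      simpa using this
    rw [hinner, pv_triple_pair]
    have hstart : k + 1 < stk.length := by omega
    have hblocks := pv_blocks stk (k + 1) hstart ((stk.length + 64 - 1) / 64) ((k + 1) / 64)
      (stk.getD k 0, 1) (by omega) (by omega)
    simp only at hblocks
    rw [hblocks]
    rw [show max (k + 1) ((k + 1) / 64 * 64) = k + 1 by
      have := Nat.div_mul_le_self (k + 1) 64; omega]
    rw [Int.max_def]
    split_ifs <;> omega
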